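-- pv_equiv track=rewrite | github.com/pypi-data/pypi-mirror-261 | packages/acidcli/acidcli-4.14.0-py3-none-any.whl/acidcli/preconditions/nuget.py | __parse_command_output_error
-- ===== SOURCE A (Python) =====
-- def __parse_command_output_error(stdout):
--     """Parse command output error.
--
--     Parses the output error from nuget restore.
--     Because the errors are returned multiple times, a dict is used to remove the duplicates.
--
--     :param: stdout: stdout to search.
--     :return: String with found errors.
--     """
--     duplicated_found_errors = []
--     stdout_lines = stdout.splitlines()
--
--     for line in stdout_lines:
--         if "Unable to find" in line:
--             duplicated_found_errors.append(line.strip())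
--
--     found_errors = list(dict.fromkeys(duplicated_found_errors))
--     return "\n".join(found_errors)
-- ===== SOURCE B (Python) =====
-- def __parse_command_output_error(stdout):
--     """Recursive head-dedup: take first match, delete all its later duplicates, recurse.
--
--     No seen-set/dict at all: first-seen order falls out of the recursion.
--     """
--     def dedup(items):
--         if not items:
--             return []
--         head = items[0]
--         return [head] + dedup([x for x in items[1:] if x != head])
--
--     matches = [line.strip() for line in stdout.splitlines() if "Unable to find" in line]
--     return "\n".join(dedup(matches))
-- ===== Notes on version B (the rewrite author's own statement) =====
-- stated objective: alternative
-- what changed: Replaces A's iterative build-then-dict.fromkeys dedup with a recursive head-and-delete scheme: take the first stripped match, remove all its later duplicates from the tail, and recurse, so no dict/set of seen keys is ever maintained.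
import Mathlib
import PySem

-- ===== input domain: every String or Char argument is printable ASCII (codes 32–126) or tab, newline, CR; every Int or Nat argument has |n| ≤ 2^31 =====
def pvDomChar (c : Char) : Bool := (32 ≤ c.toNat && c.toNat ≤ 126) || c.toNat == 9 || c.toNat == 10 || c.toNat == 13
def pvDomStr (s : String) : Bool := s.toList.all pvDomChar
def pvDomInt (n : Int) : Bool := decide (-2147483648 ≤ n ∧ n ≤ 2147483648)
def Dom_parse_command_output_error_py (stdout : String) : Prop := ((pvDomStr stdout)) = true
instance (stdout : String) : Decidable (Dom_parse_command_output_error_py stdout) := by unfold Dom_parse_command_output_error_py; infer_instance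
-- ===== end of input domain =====

-- B replaces A's build-list-then-dict.fromkeys dedup by a recursive head-and-delete
-- dedup (take first match, delete its later duplicates, recurse); objective: alternative.

-- ===== PORT A =====
def parse_command_output_error_py (stdout : String) : String :=
  let stdout_lines := PySem.Str.splitlines stdout
  let duplicated_found_errors := stdout_lines.foldl
    (fun acc line => if PySem.Str.isIn "Unable to find" line then acc ++ [PySem.Str.strip line] else acc)
    ([] : List String)
  let found_errors := (duplicated_found_errors.foldl
    (fun d k => d.insert k ()) (PySem.Dict.empty : PySem.Dict String Unit)).keys
  PySem.Str.join "\n" found_errors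

-- ===== PORT B =====
-- B's helper 'dedup': keep the head, delete all its later duplicates, recurse.
def pvDedup : List String → List String
  | [] => []
  | head :: rest => head :: pvDedup (rest.filter (fun x => x ≠ head))
termination_by xs => xs.length
decreasing_by
  simp only [List.length_unattach, List.length_cons]
  exact Nat.lt_succ_of_le (Nat.le_trans (List.length_filter_le _ _) (by simp))

def parse_command_output_error_py_alt (stdout : String) : String :=
  let found := ((PySem.Str.splitlines stdout).filter
      (fun line => PySem.Str.isIn "Unable to find" line)).map PySem.Str.strip
  PySem.Str.join "\n" (pvDedup found)

-- ===== PRECONDITION & SPEC =====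
def Spec_parse_command_output_error_py (stdout : String) (out : String) : Prop := out = parse_command_output_error_py_alt stdout
instance (stdout : String) (out : String) : Decidable (Spec_parse_command_output_error_py stdout out) := by unfold Spec_parse_command_output_error_py; infer_instance

-- ===== CLAIM (what is proved, stated in full; the proofs are below) =====
def Claim_equal_parse_command_output_error_py : Prop := ∀ (stdout : String), Dom_parse_command_output_error_py stdout → Spec_parse_command_output_error_py stdout (parse_command_output_error_py stdout)

-- ===== LEMMAS AND PROOFS =====

-- Adding an element already in the set is a no-op, so folding add over a list
-- equals folding it over the list with all copies of a present element removed.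
lemma pv_foldl_add_filter (x : String) : ∀ (xs : List String) (s : PySem.Set String), x ∈ s →
    xs.foldl PySem.Set.add s = (xs.filter (fun y => y ≠ x)).foldl PySem.Set.add s := by
  intro xs
  induction xs with
  | nil => intro s _; rfl
  | cons y ys ih =>
      intro s hx
      rw [List.filter_cons]
      by_cases hyx : y = x
      · subst hyx
        have : PySem.Set.add s y = s := by simp [PySem.Set.add, PySem.Set.contains, hx]
        simp only [List.foldl_cons, this, ne_eq, not_true_eq_false, decide_false]
        exact ih s hx
      · simp only [List.foldl_cons, ne_eq, hyx, not_false_eq_true, decide_true, if_pos]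
        exact ih (PySem.Set.add s y) (by simp [PySem.Set.add, PySem.Set.contains]; split <;> simp [hx])

-- A head element none of the folded elements equal stays at the head of the state.
lemma pv_foldl_add_cons (x : String) : ∀ (ys : List String) (s : PySem.Set String),
    (∀ y ∈ ys, y ≠ x) →
    ys.foldl PySem.Set.add (x :: s) = x :: ys.foldl PySem.Set.add s := by
  intro ys
  induction ys with
  | nil => intro s _; rfl
  | cons y ys ih =>
      intro s h
      have hyx : y ≠ x := h y (by simp)
      have hc : PySem.Set.contains (x :: s) y = PySem.Set.contains s y := by
        simp [PySem.Set.contains, hyx]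
      have hadd : PySem.Set.add (x :: s) y = x :: PySem.Set.add s y := by
        simp only [PySem.Set.add, hc]
        split <;> simp
      rw [List.foldl_cons, hadd, List.foldl_cons, ih _ (fun z hz => h z (by simp [hz]))]

-- B's recursive dedup computes exactly list(dict.fromkeys(xs)) (first occurrences, in order).
lemma pv_dedup_eq_ofList_aux : ∀ (n : Nat) (xs : List String), xs.length ≤ n →
    pvDedup xs = PySem.Set.ofList xs := by
  intro n
  induction n with
  | zero => intro xs h; rw [List.length_eq_zero_iff.mp (Nat.le_zero.mp h)]; simp [pvDedup]
  | succ n ihn =>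
      intro xs h
      match xs with
      | [] => simp [pvDedup]
      | head :: rest =>
      have ih : pvDedup (rest.filter (fun x => x ≠ head)) = PySem.Set.ofList (rest.filter (fun x => x ≠ head)) := by
        apply ihn
        exact Nat.le_trans (List.length_filter_le _ _) (Nat.succ_le_succ_iff.mp h)
      rw [show pvDedup (head :: rest) = head :: pvDedup (rest.filter (fun x => x ≠ head)) by simp [pvDedup], ih]
      have h1 : PySem.Set.ofList (head :: rest)
          = rest.foldl PySem.Set.add ([head] : PySem.Set String) := by
        simp [PySem.Set.ofList_eq_foldl, PySem.Set.add, PySem.Set.contains]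
      rw [h1, pv_foldl_add_filter head rest [head] (by simp),
        show ([head] : PySem.Set String) = head :: ([] : PySem.Set String) from rfl,
        pv_foldl_add_cons head _ _ (by intro y hy; simp at hy; exact hy.2)]
      rw [PySem.Set.ofList_eq_foldl]

-- ===== VERDICT (by name: the statement is the Claim_ definition above) =====
theorem parse_command_output_error_py_spec : Claim_equal_parse_command_output_error_py := by
  intro stdout _
  unfold Spec_parse_command_output_error_py parse_command_output_error_py parse_command_output_error_py_alt
  simp only []
  rw [PySem.List.foldl_append_if, PySem.Dict.keys_foldl_insert, PySem.Dict.keys_empty,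
    pv_dedup_eq_ofList_aux _ _ (Nat.le_refl _), PySem.Set.ofList_eq_foldl]
  rfl
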